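-- pv_equiv track=rewrite | github.com/42-topsy-turvy/seohyunk | programmers/서버_증설_횟수.py | solution
-- ===== SOURCE A (Python) =====
-- from collections import deque
--
-- def solution(players, m, k):
--     queue = deque()
--     answer = 0
--     for player in players:
--         if queue:
--             queue = deque(x - 1 for x in queue)
--         while queue:
--             if queue[0] == 0:
--                 queue.popleft()
--             else:
--                 break
--         if player >= (len(queue) + 1) * m:
--             for i in range((player - (len(queue)+1) * m)//m + 1):
--                 queue.append(k)
--                 answer += 1
--     return answer
-- ===== SOURCE B (Python) =====
-- def solution(players, m, k):
--     # Aggregate servers by expiry hour instead of decrementing each server every hour: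
--     # keep the active server count + a dict mapping expiry hour -> batch size.
--     answer = 0
--     active = 0
--     expiry = {}
--     t = 0
--     for player in players:
--         active -= expiry.pop(t, 0)
--         if player >= (active + 1) * m:
--             add = (player - (active + 1) * m) // m + 1
--             if add > 0:
--                 expiry[t + k] = add
--                 active += add
--                 answer += add
--         t += 1
--     return answer
-- ===== Notes on version B (the rewrite author's own statement) =====
-- stated objective: alternative
-- what changed: Instead of keeping one deque entry per running server and decrementing every entry every hour, B keeps only the active-server count plus a dict mapping expiry hour to the number of servers bought that hour, subtracting the whole expiring batch at once.
import Mathlib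
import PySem

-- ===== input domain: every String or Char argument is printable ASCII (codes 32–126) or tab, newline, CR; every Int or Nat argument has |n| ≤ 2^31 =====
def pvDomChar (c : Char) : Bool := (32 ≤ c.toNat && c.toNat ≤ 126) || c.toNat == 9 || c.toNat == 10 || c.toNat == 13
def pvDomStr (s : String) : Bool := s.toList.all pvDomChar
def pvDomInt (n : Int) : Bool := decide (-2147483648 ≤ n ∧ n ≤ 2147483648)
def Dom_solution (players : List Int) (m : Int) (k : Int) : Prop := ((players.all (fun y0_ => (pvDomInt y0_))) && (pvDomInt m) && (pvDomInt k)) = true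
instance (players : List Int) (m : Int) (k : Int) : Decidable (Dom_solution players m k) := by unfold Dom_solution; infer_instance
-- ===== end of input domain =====

-- B replaces A's per-server deque (decremented element-wise every hour) by an active count plus
-- an expiry-hour -> batch-size dict, handling each hour's expiries as one aggregated batch.

-- ===== PORT A =====
-- 'while queue: if queue[0] == 0: queue.popleft() else: break'
def solutionPop : List Int → List Int
  | [] => []
  | x :: xs => if x = 0 then solutionPop xs else x :: xs

-- body of 'for player in players' (state = (queue, answer))
def solutionStepA (m k : Int) (st : List Int × Int) (player : Int) : List Int × Int :=
  let q1 := if st.1.isEmpty then st.1 else st.1.map (fun x => x - 1)   -- 'if queue: queue = deque(x - 1 for x in queue)'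
  let q := solutionPop q1
  if ((q.length : Int) + 1) * m ≤ player then                          -- 'player >= (len(queue)+1) * m'
    (PySem.List.pyRange 0 (PySem.Int.floordiv (player - ((q.length : Int) + 1) * m) m + 1) 1).foldl
      (fun s _ => (s.1 ++ [k], s.2 + 1)) (q, st.2)                     -- 'queue.append(k); answer += 1'
  else (q, st.2)

def solution (players : List Int) (m : Int) (k : Int) : Int :=
  (players.foldl (solutionStepA m k) (([] : List Int), (0 : Int))).2

-- ===== PORT B =====
-- body of B's loop (state = (t, active, expiry, answer)); 'expiry.pop(t, 0)' = read with default 0, then erase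
def solutionStepB (m k : Int) (st : Int × Int × PySem.Dict Int Int × Int) (player : Int) :
    Int × Int × PySem.Dict Int Int × Int :=
  let t := st.1
  let active := st.2.1 - st.2.2.1.getD t 0
  let d := st.2.2.1.erase t
  let ans := st.2.2.2
  if (active + 1) * m ≤ player then
    let add := PySem.Int.floordiv (player - (active + 1) * m) m + 1
    if 0 < add then (t + 1, active + add, d.insert (t + k) add, ans + add)
    else (t + 1, active, d, ans)
  else (t + 1, active, d, ans)

def solution_alt (players : List Int) (m : Int) (k : Int) : Int :=
  (players.foldl (solutionStepB m k) ((0 : Int), (0 : Int), (PySem.Dict.empty : PySem.Dict Int Int), (0 : Int))).2.2.2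

-- ===== PRECONDITION & SPEC =====
-- Pre_ excludes exactly the inputs where Python A raises ZeroDivisionError: m = 0 together with
-- some player ≥ 0 (only then is the '// m' line reached). Nothing A returns on is excluded.
def Pre_solution (players : List Int) (m : Int) (k : Int) : Prop :=
  m ≠ 0 ∨ ∀ p ∈ players, p < 0
instance (players : List Int) (m : Int) (k : Int) : Decidable (Pre_solution players m k) := by
  unfold Pre_solution; infer_instance
def pvWitness_solution : List Int × Int × Int := ([3, 2, -1], 1, 2)

def Spec_solution (players : List Int) (m : Int) (k : Int) (out : Int) : Prop := out = solution_alt players m k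
instance (players : List Int) (m : Int) (k : Int) (out : Int) : Decidable (Spec_solution players m k out) := by unfold Spec_solution; infer_instance

-- ===== CLAIM (what is proved, stated in full; the proofs are below) =====
def Claim_equal_solution : Prop := ∀ (players : List Int) (m : Int) (k : Int), Dom_solution players m k → Pre_solution players m k → Spec_solution players m k (solution players m k)

-- ===== LEMMAS AND PROOFS =====

-- the 'if queue:' guard is redundant: map on [] is []
theorem solution_dec_guard (Q : List Int) :
    (if Q.isEmpty then Q else Q.map (fun x => x - 1)) = Q.map (fun x => x - 1) := by
  cases Q <;> simp

theorem solution_pop_sorted (Q : List Int) (hs : Q.Pairwise (· ≤ ·)) (h0 : ∀ v ∈ Q, 0 ≤ v) :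
    solutionPop Q = Q.filter (fun x => decide (x ≠ 0)) := by
  induction Q with
  | nil => simp [solutionPop]
  | cons x xs ih =>
    rcases List.pairwise_cons.mp hs with ⟨hx, hxs⟩
    by_cases hx0 : x = 0
    · subst hx0
      simpa [solutionPop] using ih hxs (fun v hv => h0 v (List.mem_cons_of_mem _ hv))
    · have hfil : xs.filter (fun v => decide (v ≠ 0)) = xs := by
        apply List.filter_eq_self.mpr
        intro a ha
        have h1 : x ≤ a := hx a ha
        have h2 : 0 ≤ x := h0 x (List.mem_cons_self)
        simp only [decide_eq_true_eq]
        omega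
      rw [show solutionPop (x :: xs) = x :: xs from by simp [solutionPop, hx0],
         List.filter_cons_of_pos (by simp [hx0]), hfil]

theorem solution_pop_neg (Q : List Int) (h : ∀ v ∈ Q, v < 0) : solutionPop Q = Q := by
  cases Q with
  | nil => rfl
  | cons x xs =>
    have : x ≠ 0 := by have := h x (List.mem_cons_self); omega
    simp [solutionPop, this]

theorem solution_count_map_sub_one (l : List Int) (w : Int) :
    (l.map (fun x => x - 1)).count w = l.count (w + 1) := by
  have := List.count_map_of_injective (l := l) (f := fun x => x - 1) (x := w + 1)
    (by intro a b hab; simpa using hab)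
  simpa using this

theorem solution_len_filter (l : List Int) :
    (l.filter (fun x => decide (x ≠ 0))).length + l.count 0 = l.length := by
  induction l with
  | nil => rfl
  | cons x xs ih =>
    by_cases hx : x = 0
    · rw [List.filter_cons_of_neg (by simp [hx])]
      have h0 : (x :: xs).count 0 = xs.count 0 + 1 := by simp [hx]
      rw [h0, List.length_cons]
      omega
    · rw [List.filter_cons_of_pos (by simp [hx])]
      have h0 : (x :: xs).count 0 = xs.count 0 := by simp [hx]
      rw [h0, List.length_cons, List.length_cons]
      omega

theorem solution_foldl_app (k : Int) (l : List Int) : ∀ (q : List Int) (a : Int),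
    l.foldl (fun s (_ : Int) => (s.1 ++ [k], s.2 + 1)) (q, a)
      = (q ++ List.replicate l.length k, a + l.length) := by
  induction l with
  | nil => intro q a; simp
  | cons x xs ih =>
    intro q a
    rw [List.foldl_cons, ih]
    refine Prod.ext ?_ ?_
    · simp [List.replicate_succ]
    · simp; push_cast; ring

theorem solution_getD_erase_ne (d : PySem.Dict Int Int) (s t : Int) (h : s ≠ t) :
    (d.erase t).getD s 0 = d.getD s 0 := by
  have hpred : (fun (a : Int × Int) => decide (((!(a.1 == t)) = true) ∧ ((a.1 == s) = true)))
      = (fun (a : Int × Int) => a.1 == s) := by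
    funext a
    by_cases ha : a.1 = s
    · simp [ha, h]
    · simp [ha]
  simp only [PySem.Dict.getD, PySem.Dict.get?, PySem.Dict.erase]
  rw [List.find?_filter, hpred]

-- the simulation invariant: at the start of hour t, B's dict holds, for every future hour s,
-- exactly the number of A's queue entries that will be popped at hour s (value s - t + 1 now)
def SrvInv (k t : Int) (Q : List Int) (d : PySem.Dict Int Int) : Prop :=
  Q.Pairwise (· ≤ ·) ∧ (∀ v ∈ Q, v ≤ k) ∧ (1 ≤ k → ∀ v ∈ Q, 1 ≤ v) ∧
  ∀ s : Int, t ≤ s → d.getD s 0 = (Q.count (s - t + 1) : Int)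

theorem solution_step_sim (m k t p ans : Int) (Q : List Int) (d : PySem.Dict Int Int)
    (hinv : SrvInv k t Q d) :
    ∃ (Q' : List Int) (d' : PySem.Dict Int Int) (a' : Int),
      solutionStepA m k (Q, ans) p = (Q', a') ∧
      solutionStepB m k (t, (Q.length : Int), d, ans) p = (t + 1, (Q'.length : Int), d', a') ∧
      SrvInv k (t + 1) Q' d' := by
  obtain ⟨hsort, hub, hlb, hcnt⟩ := hinv
  have hQ1sort : (Q.map (fun x => x - 1)).Pairwise (· ≤ ·) :=
    List.Pairwise.map _ (fun a b hab => by omega) hsort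
  have hQ2eq : solutionPop (Q.map (fun x => x - 1))
      = (Q.map (fun x => x - 1)).filter (fun x => decide (x ≠ 0)) := by
    by_cases hk : 1 ≤ k
    · apply solution_pop_sorted _ hQ1sort
      intro v hv
      obtain ⟨x, hx, rfl⟩ := List.mem_map.mp hv
      have := hlb hk x hx; omega
    · have hneg : ∀ v ∈ Q.map (fun x => x - 1), v < 0 := by
        intro v hv
        obtain ⟨x, hx, rfl⟩ := List.mem_map.mp hv
        have := hub x hx; omega
      rw [solution_pop_neg _ hneg]
      exact (List.filter_eq_self.mpr (fun a ha => by
        have := hneg a ha; simp only [decide_eq_true_eq]; omega)).symm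
  have hmemQ2 : ∀ v ∈ (Q.map (fun x => x - 1)).filter (fun x => decide (x ≠ 0)),
      ∃ x ∈ Q, v = x - 1 ∧ v ≠ 0 := by
    intro v hv
    have h1 := List.mem_of_mem_filter hv
    have h2 := List.of_mem_filter hv
    obtain ⟨x, hx, rfl⟩ := List.mem_map.mp h1
    exact ⟨x, hx, rfl, by simpa using h2⟩
  have hub2 : ∀ v ∈ (Q.map (fun x => x - 1)).filter (fun x => decide (x ≠ 0)), v ≤ k - 1 := by
    intro v hv
    obtain ⟨x, hx, hv1, _⟩ := hmemQ2 v hv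
    have := hub x hx; omega
  have hlb2 : 1 ≤ k → ∀ v ∈ (Q.map (fun x => x - 1)).filter (fun x => decide (x ≠ 0)), 1 ≤ v := by
    intro hk v hv
    obtain ⟨x, hx, hv1, hne⟩ := hmemQ2 v hv
    have := hlb hk x hx; omega
  have hsort2 : ((Q.map (fun x => x - 1)).filter (fun x => decide (x ≠ 0))).Pairwise (· ≤ ·) :=
    hQ1sort.filter _
  have hcnt2 : ∀ w : Int, 1 ≤ w →
      ((Q.map (fun x => x - 1)).filter (fun x => decide (x ≠ 0))).count w = Q.count (w + 1) := by
    intro w hw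
    rw [List.count_filter (by simp only [decide_eq_true_eq]; omega),
        solution_count_map_sub_one]
  have hknot : ((Q.map (fun x => x - 1)).filter (fun x => decide (x ≠ 0))).count k = 0 :=
    List.count_eq_zero.mpr (fun hk2 => by have := hub2 k hk2; omega)
  have hlen2 : (((Q.map (fun x => x - 1)).filter (fun x => decide (x ≠ 0))).length : Int)
      = (Q.length : Int) - (Q.count 1 : Nat) := by
    have h1 := solution_len_filter (Q.map (fun x => x - 1))
    have h0 : (Q.map (fun x => x - 1)).count 0 = Q.count 1 := by
      simpa using solution_count_map_sub_one Q 0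
    have hL : (Q.map (fun x => x - 1)).length = Q.length := by simp
    omega
  have hact : (Q.length : Int) - d.getD t 0
      = (((Q.map (fun x => x - 1)).filter (fun x => decide (x ≠ 0))).length : Int) := by
    have h1 := hcnt t le_rfl
    have ht : t - t + 1 = (1 : Int) := by ring
    rw [ht] at h1
    rw [h1, hlen2]
  -- abbreviations (plain terms, no `set`, to keep rewriting predictable)
  have hA : solutionStepA m k (Q, ans) p
      = (if ((((Q.map (fun x => x - 1)).filter (fun x => decide (x ≠ 0))).length : Int) + 1) * m ≤ p then
          (PySem.List.pyRange 0 (PySem.Int.floordiv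
              (p - ((((Q.map (fun x => x - 1)).filter (fun x => decide (x ≠ 0))).length : Int) + 1) * m) m + 1) 1).foldl
            (fun s _ => (s.1 ++ [k], s.2 + 1))
            ((Q.map (fun x => x - 1)).filter (fun x => decide (x ≠ 0)), ans)
        else ((Q.map (fun x => x - 1)).filter (fun x => decide (x ≠ 0)), ans)) := by
    simp only [solutionStepA, solution_dec_guard, hQ2eq]
  have hB : solutionStepB m k (t, (Q.length : Int), d, ans) p
      = (if ((((Q.map (fun x => x - 1)).filter (fun x => decide (x ≠ 0))).length : Int) + 1) * m ≤ p then
          (if 0 < PySem.Int.floordiv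
              (p - ((((Q.map (fun x => x - 1)).filter (fun x => decide (x ≠ 0))).length : Int) + 1) * m) m + 1 then
            (t + 1, (((Q.map (fun x => x - 1)).filter (fun x => decide (x ≠ 0))).length : Int)
                + (PySem.Int.floordiv
                    (p - ((((Q.map (fun x => x - 1)).filter (fun x => decide (x ≠ 0))).length : Int) + 1) * m) m + 1),
              (d.erase t).insert (t + k)
                (PySem.Int.floordiv
                    (p - ((((Q.map (fun x => x - 1)).filter (fun x => decide (x ≠ 0))).length : Int) + 1) * m) m + 1),
              ans + (PySem.Int.floordiv
                  (p - ((((Q.map (fun x => x - 1)).filter (fun x => decide (x ≠ 0))).length : Int) + 1) * m) m + 1))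
          else (t + 1, (((Q.map (fun x => x - 1)).filter (fun x => decide (x ≠ 0))).length : Int), d.erase t, ans))
        else (t + 1, (((Q.map (fun x => x - 1)).filter (fun x => decide (x ≠ 0))).length : Int), d.erase t, ans)) := by
    simp only [solutionStepB]
    rw [hact]
  have hinvE : ∀ s : Int, t + 1 ≤ s → (d.erase t).getD s 0
      = ((((Q.map (fun x => x - 1)).filter (fun x => decide (x ≠ 0))).count (s - (t + 1) + 1) : Nat) : Int) := by
    intro s hs
    rw [solution_getD_erase_ne d s t (by omega), hcnt s (by omega)]
    have hidx : s - (t + 1) + 1 = s - t := by ring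
    rw [hidx, hcnt2 (s - t) (by omega)]
  by_cases hcond : ((((Q.map (fun x => x - 1)).filter (fun x => decide (x ≠ 0))).length : Int) + 1) * m ≤ p
  · rw [if_pos hcond] at hA hB
    by_cases hpos : 0 < PySem.Int.floordiv
        (p - ((((Q.map (fun x => x - 1)).filter (fun x => decide (x ≠ 0))).length : Int) + 1) * m) m + 1
    · rw [if_pos hpos] at hB
      have hn : ((PySem.Int.floordiv
          (p - ((((Q.map (fun x => x - 1)).filter (fun x => decide (x ≠ 0))).length : Int) + 1) * m) m + 1).toNat : Int)
          = PySem.Int.floordiv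
            (p - ((((Q.map (fun x => x - 1)).filter (fun x => decide (x ≠ 0))).length : Int) + 1) * m) m + 1 :=
        Int.toNat_of_nonneg (le_of_lt hpos)
      have hlenR : (PySem.List.pyRange 0 (PySem.Int.floordiv
          (p - ((((Q.map (fun x => x - 1)).filter (fun x => decide (x ≠ 0))).length : Int) + 1) * m) m + 1) 1).length
          = (PySem.Int.floordiv
            (p - ((((Q.map (fun x => x - 1)).filter (fun x => decide (x ≠ 0))).length : Int) + 1) * m) m + 1).toNat := by
        rw [PySem.List.length_pyRange_one]; norm_num
      rw [solution_foldl_app, hlenR] at hA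
      refine ⟨_, (d.erase t).insert (t + k)
        (PySem.Int.floordiv
          (p - ((((Q.map (fun x => x - 1)).filter (fun x => decide (x ≠ 0))).length : Int) + 1) * m) m + 1),
        _, hA, ?_, ?_, ?_, ?_, ?_⟩
      · rw [hB]
        simp only [Prod.mk.injEq, List.length_append, List.length_replicate, true_and]
        constructor <;> (push_cast [hn]; ring)
      -- invariant: sortedness
      · apply List.pairwise_append.mpr
        refine ⟨hsort2, ?_, ?_⟩
        · exact List.pairwise_replicate.mpr (Or.inr le_rfl)
        · intro a ha b hb
          have hbk := List.eq_of_mem_replicate hb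
          have := hub2 a ha
          omega
      -- invariant: upper bound
      · intro v hv
        rcases List.mem_append.mp hv with hv | hv
        · have := hub2 v hv; omega
        · have := List.eq_of_mem_replicate hv; omega
      -- invariant: lower bound
      · intro hk v hv
        rcases List.mem_append.mp hv with hv | hv
        · exact hlb2 hk v hv
        · have := List.eq_of_mem_replicate hv; omega
      -- invariant: counts
      · intro s hs
        have hidx : s - (t + 1) + 1 = s - t := by ring
        rw [hidx, List.count_append]
        by_cases hsk : s = t + k
        · subst hsk
          rw [PySem.Dict.getD_insert_self]
          have hstk : t + k - t = k := by ring
          rw [hstk, hknot, List.count_replicate, if_pos (by simp : ((k == k) = true)), Nat.zero_add]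
          exact hn.symm

        · rw [PySem.Dict.getD_insert, if_neg hsk]
          have h1 := hinvE s hs
          rw [hidx] at h1
          rw [h1, List.count_replicate]
          have h3 : ¬ (k = s - t) := by omega
          simp [h3]
    · rw [if_neg hpos] at hB
      have hnil : PySem.List.pyRange 0 (PySem.Int.floordiv
          (p - ((((Q.map (fun x => x - 1)).filter (fun x => decide (x ≠ 0))).length : Int) + 1) * m) m + 1) 1 = [] :=
        PySem.List.pyRange_one_eq_nil (by omega)
      rw [hnil, List.foldl_nil] at hA
      exact ⟨_, _, _, hA, hB, hsort2, fun v hv => by have := hub2 v hv; omega, hlb2, hinvE⟩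
  · rw [if_neg hcond] at hA hB
    exact ⟨_, _, _, hA, hB, hsort2, fun v hv => by have := hub2 v hv; omega, hlb2, hinvE⟩

theorem solution_sim (m k : Int) : ∀ (ps : List Int) (t ans : Int) (Q : List Int)
    (d : PySem.Dict Int Int), SrvInv k t Q d →
    (ps.foldl (solutionStepA m k) (Q, ans)).2
      = (ps.foldl (solutionStepB m k) (t, (Q.length : Int), d, ans)).2.2.2
  | [], _, _, _, _, _ => rfl
  | p :: ps, t, ans, Q, d, hinv => by
    obtain ⟨Q', d', a', hA, hB, hinv'⟩ := solution_step_sim m k t p ans Q d hinv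
    rw [List.foldl_cons, List.foldl_cons, hA, hB]
    exact solution_sim m k ps (t + 1) a' Q' d' hinv'

-- ===== VERDICT (by name: the statement is the Claim_ definition above) =====
theorem solution_spec : Claim_equal_solution := by
  intro players m k _ _
  show solution players m k = solution_alt players m k
  unfold solution solution_alt
  have hinv : SrvInv k 0 [] PySem.Dict.empty := by
    refine ⟨List.Pairwise.nil, by simp, by simp, ?_⟩
    intro s _
    simp [PySem.Dict.getD_empty]
  simpa using solution_sim m k players 0 0 [] PySem.Dict.empty hinv
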